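-- pv_equiv track=rewrite | github.com/ekarajp/ep-civil-suite | apps/singly_beam/workspace_page.py | _warning_text_to_html
-- ===== SOURCE A (Python) =====
-- def _warning_text_to_html(message: str) -> str:
--     html = (
--         message.replace("<=", "&le;")
--         .replace(">=", "&ge;")
--         .replace(" < ", " &lt; ")
--         .replace(" > ", " &gt; ")
--     )
--     replacements = [
--         ("A_s,total", "A<sub>s,total</sub>"),
--         ("A_s,min", "A<sub>s,min</sub>"),
--         ("A_s,max", "A<sub>s,max</sub>"),
--         ("A_s", "A<sub>s</sub>"),
--         ("A_v,min", "A<sub>v,min</sub>"),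
--         ("A_v", "A<sub>v</sub>"),
--         ("A_l", "A<sub>l</sub>"),
--         ("A_t/s", "A<sub>t</sub>/s"),
--         ("At/s", "A<sub>t</sub>/s"),
--         ("V_u", "V<sub>u</sub>"),
--         ("V_n", "V<sub>n</sub>"),
--         ("V_c", "V<sub>c</sub>"),
--         ("V_s", "V<sub>s</sub>"),
--         ("M_u", "M<sub>u</sub>"),
--         ("M_n", "M<sub>n</sub>"),
--         ("phi", "&phi;"),
--         ("lambda_s", "&lambda;<sub>s</sub>"),
--         ("f'c", "f&#8242;<sub>c</sub>"),
--         ("cm2", "cm<sup>2</sup>"),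
--     ]
--     for old, new in replacements:
--         html = html.replace(old, new)
--     return html
-- ===== SOURCE B (Python) =====
-- # One left-to-right regex scan per phase with a token->HTML table, instead of 23 whole-string
-- # .replace passes.  Two phases are needed: in A the spaces around an escaped less-than sign
-- # stay available to the separate, later greater-than pass, which a single scan cannot mimic.
-- import re
--
-- _TABLE1 = {"<=": "&le;", ">=": "&ge;", " < ": " &lt; "}
-- _TABLE2 = {
--     " > ": " &gt; ",
--     "A_s,total": "A<sub>s,total</sub>",
--     "A_s,min": "A<sub>s,min</sub>",
--     "A_s,max": "A<sub>s,max</sub>",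
--     "A_s": "A<sub>s</sub>",
--     "A_v,min": "A<sub>v,min</sub>",
--     "A_v": "A<sub>v</sub>",
--     "A_l": "A<sub>l</sub>",
--     "A_t/s": "A<sub>t</sub>/s",
--     "At/s": "A<sub>t</sub>/s",
--     "V_u": "V<sub>u</sub>",
--     "V_n": "V<sub>n</sub>",
--     "V_c": "V<sub>c</sub>",
--     "V_s": "V<sub>s</sub>",
--     "M_u": "M<sub>u</sub>",
--     "M_n": "M<sub>n</sub>",
--     "phi": "&phi;",
--     "lambda_s": "&lambda;<sub>s</sub>",
--     "f'c": "f&#8242;<sub>c</sub>",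
--     "cm2": "cm<sup>2</sup>",
-- }
-- _RX1 = re.compile("|".join(re.escape(t) for t in _TABLE1))
-- _RX2 = re.compile("|".join(re.escape(t) for t in _TABLE2))
--
--
-- def _warning_text_to_html(message: str) -> str:
--     escaped = _RX1.sub(lambda m: _TABLE1[m.group(0)], message)
--     return _RX2.sub(lambda m: _TABLE2[m.group(0)], escaped)
-- ===== Notes on version B (the rewrite author's own statement) =====
-- stated objective: idiomatic
-- what changed: Replaced A's 23 sequential whole-string .replace passes with two compiled-regex alternations (token-to-HTML table, most-specific token first) applied by re.sub, i.e. two single left-to-right scans; the less-than escape phase must stay a separate scan from the greater-than escape phase because in A the spaces around an escaped less-than sign remain available to the later greater-than pass.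
import Mathlib
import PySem

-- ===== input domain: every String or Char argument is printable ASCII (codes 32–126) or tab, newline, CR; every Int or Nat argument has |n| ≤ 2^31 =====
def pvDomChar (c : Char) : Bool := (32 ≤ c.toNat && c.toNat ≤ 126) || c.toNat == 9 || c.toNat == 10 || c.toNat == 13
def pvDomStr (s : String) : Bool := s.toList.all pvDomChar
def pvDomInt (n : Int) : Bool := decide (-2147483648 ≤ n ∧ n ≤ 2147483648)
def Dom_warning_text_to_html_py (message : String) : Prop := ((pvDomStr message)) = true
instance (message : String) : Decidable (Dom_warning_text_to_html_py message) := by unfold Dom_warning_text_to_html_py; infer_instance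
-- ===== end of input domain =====

-- B replaces A's 23 sequential whole-string .replace passes by two single left-to-right
-- table-driven regex scans (the " < " pass must stay separate from the " > " pass, so two scans).


-- ===== PORT A =====
def warning_text_to_html_py (message : String) : String :=
  let html :=
    PySem.Str.replace
      (PySem.Str.replace
        (PySem.Str.replace
          (PySem.Str.replace message "<=" "&le;")
          ">=" "&ge;")
        " < " " &lt; ")
      " > " " &gt; "
  let replacements : List (String × String) :=
    [ ("A_s,total", "A<sub>s,total</sub>"),
      ("A_s,min", "A<sub>s,min</sub>"),
      ("A_s,max", "A<sub>s,max</sub>"),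
      ("A_s", "A<sub>s</sub>"),
      ("A_v,min", "A<sub>v,min</sub>"),
      ("A_v", "A<sub>v</sub>"),
      ("A_l", "A<sub>l</sub>"),
      ("A_t/s", "A<sub>t</sub>/s"),
      ("At/s", "A<sub>t</sub>/s"),
      ("V_u", "V<sub>u</sub>"),
      ("V_n", "V<sub>n</sub>"),
      ("V_c", "V<sub>c</sub>"),
      ("V_s", "V<sub>s</sub>"),
      ("M_u", "M<sub>u</sub>"),
      ("M_n", "M<sub>n</sub>"),
      ("phi", "&phi;"),
      ("lambda_s", "&lambda;<sub>s</sub>"),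
      ("f'c", "f&#8242;<sub>c</sub>"),
      ("cm2", "cm<sup>2</sup>") ]
  replacements.foldl (fun h p => PySem.Str.replace h p.1 p.2) html

-- ===== PORT B =====
-- a compiled alternation of literal tokens applied by re.sub = one left-to-right scan:
-- at each position try the alternatives in table order; on a match emit the table entry and
-- jump over the matched token, otherwise copy one character.  (max 1 _ is a totalization
-- guard only; every token in the tables is nonempty.)
def pvScan (P : List (List Char × List Char)) : List Char → List Char
  | [] => []
  | c :: w =>
    match P.find? (fun p => p.1.isPrefixOf (c :: w)) with
    | some (t, u) => u ++ pvScan P ((c :: w).drop (max 1 t.length))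
    | none => c :: pvScan P w
termination_by s => s.length
decreasing_by
  · simp only [List.length_drop, List.length_cons]; omega
  · simp

def pvTable1 : List (List Char × List Char) :=
  [ ("<=".toList, "&le;".toList),
    (">=".toList, "&ge;".toList),
    (" < ".toList, " &lt; ".toList) ]

def pvTable2 : List (List Char × List Char) :=
  [ (" > ".toList, " &gt; ".toList),
    ("A_s,total".toList, "A<sub>s,total</sub>".toList),
    ("A_s,min".toList, "A<sub>s,min</sub>".toList),
    ("A_s,max".toList, "A<sub>s,max</sub>".toList),
    ("A_s".toList, "A<sub>s</sub>".toList),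
    ("A_v,min".toList, "A<sub>v,min</sub>".toList),
    ("A_v".toList, "A<sub>v</sub>".toList),
    ("A_l".toList, "A<sub>l</sub>".toList),
    ("A_t/s".toList, "A<sub>t</sub>/s".toList),
    ("At/s".toList, "A<sub>t</sub>/s".toList),
    ("V_u".toList, "V<sub>u</sub>".toList),
    ("V_n".toList, "V<sub>n</sub>".toList),
    ("V_c".toList, "V<sub>c</sub>".toList),
    ("V_s".toList, "V<sub>s</sub>".toList),
    ("M_u".toList, "M<sub>u</sub>".toList),
    ("M_n".toList, "M<sub>n</sub>".toList),
    ("phi".toList, "&phi;".toList),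
    ("lambda_s".toList, "&lambda;<sub>s</sub>".toList),
    ("f'c".toList, "f&#8242;<sub>c</sub>".toList),
    ("cm2".toList, "cm<sup>2</sup>".toList) ]

def warning_text_to_html_py_alt (message : String) : String :=
  String.ofList (pvScan pvTable2 (pvScan pvTable1 message.toList))

-- ===== PRECONDITION & SPEC =====
def Spec_warning_text_to_html_py (message : String) (out : String) : Prop := out = warning_text_to_html_py_alt message
instance (message : String) (out : String) : Decidable (Spec_warning_text_to_html_py message out) := by unfold Spec_warning_text_to_html_py; infer_instance

-- ===== CLAIM (what is proved, stated in full; the proofs are below) =====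
def Claim_equal_warning_text_to_html_py : Prop := ∀ (message : String), Dom_warning_text_to_html_py message → Spec_warning_text_to_html_py message (warning_text_to_html_py message)

-- ===== LEMMAS AND PROOFS =====

-- proof-side model of one Python str.replace pass (old nonempty), same scan shape as replace.go
def pvRep (t u : List Char) : List Char → List Char
  | [] => []
  | c :: w =>
    if t.isPrefixOf (c :: w) then u ++ pvRep t u ((c :: w).drop (max 1 t.length))
    else c :: pvRep t u w
termination_by s => s.length
decreasing_by
  · simp only [List.length_drop, List.length_cons]; omega
  · simp

def pvStep (a : List Char) (p : List Char × List Char) : List Char := pvRep p.1 p.2 a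

theorem pvRep_nil (t u : List Char) : pvRep t u [] = [] := by simp [pvRep]

theorem pvGo_eq_pvRep (old new : List Char) (hold : old ≠ []) :
    ∀ (fuel : Nat) (l acc : List Char), l.length ≤ fuel →
      PySem.Chars.replace.go old new fuel l acc = acc.reverse ++ pvRep old new l := by
  intro fuel
  induction fuel with
  | zero =>
    intro l acc hl
    have : l = [] := by cases l <;> simp_all
    subst this
    rw [PySem.Chars.replace.go.eq_def]
    simp [pvRep_nil]
  | succ n ih =>
    intro l acc hl
    cases l with
    | nil => rw [PySem.Chars.replace.go.eq_def]; simp [pvRep_nil]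
    | cons c w =>
      rw [PySem.Chars.replace.go.eq_def]
      by_cases hpre : old.isPrefixOf (c :: w)
      · simp only [hpre, if_true]
        have hlen : old.length ≥ 1 := by cases old <;> simp_all
        have hmax : max 1 old.length = old.length := by omega
        rw [ih _ _ (by simp only [List.length_drop, List.length_cons]; simp at hl; omega)]
        rw [pvRep]
        simp only [hpre, if_true, hmax]
        simp
      · simp only [hpre, Bool.false_eq_true, if_false]
        rw [ih _ _ (by simp at hl ⊢; omega)]
        rw [pvRep]
        simp [hpre]

theorem pvReplace_eq_pvRep (s old new : List Char) (hold : old ≠ []) :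
    PySem.Chars.replace s old new = pvRep old new s := by
  unfold PySem.Chars.replace
  rw [if_neg (by simpa [List.isEmpty_iff] using hold)]
  simpa using pvGo_eq_pvRep old new hold s.length s [] le_rfl

-- the interaction-freeness conditions on a table, all decidable on concrete tables
def pvTailCond (P : List (List Char × List Char)) : Prop :=
  ∀ tok ∈ P.map Prod.fst, ∀ b ∈ tok.tails, b ≠ [] →
    ∀ p ∈ P, (b.isPrefixOf p.2 = true → b.isPrefixOf p.1 = true) ∧ ¬ p.2.isPrefixOf b = true

def pvOrdCond (P : List (List Char × List Char)) : Prop :=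
  List.Pairwise (fun pm pi =>
    (∀ q, q < pi.1.length → 0 < q →
      ¬ pm.1.isPrefixOf (pi.1.drop q) = true ∧ ¬ (pi.1.drop q).isPrefixOf pm.1 = true) ∧
    (∀ q, q < pm.2.length →
      ¬ pi.1.isPrefixOf (pm.2.drop q) = true ∧ ¬ (pm.2.drop q).isPrefixOf pi.1 = true)) P

def pvNECond (P : List (List Char × List Char)) : Prop := ∀ p ∈ P, p.1 ≠ []

-- a token-tail prefix of a replaced string was already a prefix of the original string
theorem pvPref (P : List (List Char × List Char)) (hT : pvTailCond P)
    {t u : List Char} (hmem : (t, u) ∈ P) :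
    ∀ (z e tok : List Char), tok ∈ P.map Prod.fst → e <:+ tok → e ≠ [] →
      e <+: pvRep t u z → e <+: z := by
  intro z
  induction z using pvRep.induct t with
  | case1 =>
    intro e tok _ _ _ h
    simpa [pvRep_nil] using h
  | case2 c w hpre ih =>
    intro e tok htok hsuf hne h
    rw [pvRep, if_pos hpre] at h
    rcases List.prefix_or_prefix_of_prefix h (List.prefix_append u _) with h1 | h1
    · -- e is a prefix of the inserted text u: by hT it is a prefix of t, hence of z
      have := (hT tok htok e (by rwa [List.mem_tails]) hne (t, u) hmem).1
      have het : e <+: t := by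
        have := this (List.isPrefixOf_iff_prefix.mpr h1)
        exact List.isPrefixOf_iff_prefix.mp this
      exact het.trans (List.isPrefixOf_iff_prefix.mp hpre)
    · -- u would be a prefix of the token tail e: excluded by hT
      exact absurd (List.isPrefixOf_iff_prefix.mpr h1)
        ((hT tok htok e (by rwa [List.mem_tails]) hne (t, u) hmem).2)
  | case3 c w hpre ih =>
    intro e tok htok hsuf hne h
    rw [pvRep, if_neg hpre] at h
    cases e with
    | nil => exact absurd rfl hne
    | cons e0 e' =>
      obtain ⟨rfl, h'⟩ : e0 = c ∧ e' <+: pvRep t u w := List.cons_prefix_cons.mp h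
      cases e' with
      | nil => exact ⟨w, rfl⟩
      | cons f fs =>
        have hsuf' : (f :: fs) <:+ tok := (List.suffix_cons _ _).trans hsuf
        have := ih (f :: fs) tok htok hsuf' (by simp) h'
        exact (List.prefix_cons_inj _).mpr this

-- a pass walks over a region it cannot match in
theorem pvRep_skip (t u : List Char) :
    ∀ (x z : List Char), (∀ q, q < x.length → ¬ t.isPrefixOf (x.drop q ++ z) = true) →
      pvRep t u (x ++ z) = x ++ pvRep t u z := by
  intro x
  induction x with
  | nil => intro z _; rfl
  | cons c x' ih =>
    intro z hx
    have h0 : ¬ t.isPrefixOf (c :: (x' ++ z)) = true := by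
      have := hx 0 (by simp)
      simpa using this
    show pvRep t u (c :: (x' ++ z)) = c :: (x' ++ pvRep t u z)
    rw [pvRep, if_neg h0]
    rw [ih z (fun q hq => by have := hx (q + 1) (by simp; omega); simpa using this)]

-- fold of passes over a guarded region x: each pass skips x, inserted text reflects back to y
theorem pvFoldSkip (P : List (List Char × List Char)) (hT : pvTailCond P) :
    ∀ (Q : List (List Char × List Char)), (∀ p ∈ Q, p ∈ P) →
    ∀ (x y Y : List Char),
      (∀ e tok, tok ∈ P.map Prod.fst → e <:+ tok → e ≠ [] → e <+: Y → e <+: y) →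
      (∀ p ∈ Q, ∀ q, q < x.length → ¬ p.1.isPrefixOf (x.drop q ++ y) = true) →
      Q.foldl pvStep (x ++ Y) = x ++ Q.foldl pvStep Y := by
  intro Q
  induction Q with
  | nil => intro _ x y Y _ _; rfl
  | cons p Q' ih =>
    intro hQ x y Y hrefl hx
    obtain ⟨t, u⟩ := p
    have hmem : (t, u) ∈ P := hQ (t, u) (by simp)
    have hskip : pvRep t u (x ++ Y) = x ++ pvRep t u Y := by
      apply pvRep_skip
      intro q hq habs
      have habs' := List.isPrefixOf_iff_prefix.mp habs
      rcases List.prefix_or_prefix_of_prefix habs' (List.prefix_append (x.drop q) Y) with h1 | h1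
      · -- t lies inside (x.drop q): then t is also a prefix of x.drop q ++ y
        exact hx (t, u) (by simp) q hq (List.isPrefixOf_iff_prefix.mpr (h1.trans (List.prefix_append _ y)))
      · -- t = (x.drop q) ++ e with e a prefix of Y: reflect e back to y
        obtain ⟨e, hte⟩ := h1
        have he : e <+: Y := by
          rw [← hte] at habs'
          exact (List.prefix_append_right_inj (x.drop q)).mp habs'
        cases e with
        | nil =>
          refine hx (t, u) (by simp) q hq (List.isPrefixOf_iff_prefix.mpr ?_)
          rw [← hte]
          exact (List.prefix_append_right_inj (x.drop q)).mpr (List.nil_prefix)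
        | cons f fs =>
          have hey : (f :: fs) <+: y :=
            hrefl (f :: fs) t (List.mem_map_of_mem hmem)
              (by rw [← hte]; exact List.suffix_append _ _) (by simp) he
          refine hx (t, u) (by simp) q hq (List.isPrefixOf_iff_prefix.mpr ?_)
          rw [← hte]
          exact (List.prefix_append_right_inj (x.drop q)).mpr hey
    show Q'.foldl pvStep (pvStep (x ++ Y) (t, u)) = x ++ Q'.foldl pvStep (pvStep Y (t, u))
    unfold pvStep
    rw [hskip]
    apply ih (fun p hp => hQ p (by simp [hp])) x y (pvRep t u Y)
    · intro e tok htok hsuf hne hpre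
      exact hrefl e tok htok hsuf hne (pvPref P hT hmem Y e tok htok hsuf hne hpre)
    · intro p hp q hq
      exact hx p (by simp [hp]) q hq

-- prefixes that are token tails reflect through a fold of passes
theorem pvFoldRefl (P : List (List Char × List Char)) (hT : pvTailCond P) :
    ∀ (Q : List (List Char × List Char)), (∀ p ∈ Q, p ∈ P) →
    ∀ (y e tok : List Char), tok ∈ P.map Prod.fst → e <:+ tok → e ≠ [] →
      e <+: Q.foldl pvStep y → e <+: y := by
  intro Q
  induction Q with
  | nil => intro _ y e tok _ _ _ h; exact h
  | cons p Q' ih =>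
    intro hQ y e tok htok hsuf hne h
    obtain ⟨t, u⟩ := p
    have h' : e <+: pvRep t u y :=
      ih (fun p hp => hQ p (by simp [hp])) (pvRep t u y) e tok htok hsuf hne h
    exact pvPref P hT (hQ (t, u) (by simp)) y e tok htok hsuf hne h'

theorem pvFold_nil (Q : List (List Char × List Char)) : Q.foldl pvStep [] = [] := by
  induction Q with
  | nil => rfl
  | cons p Q' ih => simpa [pvStep, pvRep_nil] using ih

-- all passes step together over an unmatched head character
theorem pvPasses_cons (P : List (List Char × List Char)) (hT : pvTailCond P)
    (hN : pvNECond P) :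
    ∀ (Q : List (List Char × List Char)), (∀ p ∈ Q, p ∈ P) →
    ∀ (c : Char) (w : List Char), (∀ p ∈ Q, ¬ p.1.isPrefixOf (c :: w) = true) →
      Q.foldl pvStep (c :: w) = c :: Q.foldl pvStep w := by
  intro Q
  induction Q with
  | nil => intro _ c w _; rfl
  | cons p Q' ih =>
    intro hQ c w hw
    obtain ⟨t, u⟩ := p
    have hmem : (t, u) ∈ P := hQ (t, u) (by simp)
    have hnp : ¬ t.isPrefixOf (c :: w) = true := hw (t, u) (by simp)
    show Q'.foldl pvStep (pvStep (c :: w) (t, u)) = c :: Q'.foldl pvStep (pvStep w (t, u))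
    unfold pvStep
    rw [pvRep, if_neg hnp]
    apply ih (fun p hp => hQ p (by simp [hp])) c (pvRep t u w)
    intro p hp habs
    have habs' := List.isPrefixOf_iff_prefix.mp habs
    cases hp1 : p.1 with
    | nil => exact hN p (hQ p (by simp [hp])) hp1
    | cons c0 e =>
      rw [hp1] at habs'
      obtain ⟨rfl, he⟩ : c0 = c ∧ e <+: pvRep t u w := List.cons_prefix_cons.mp habs'
      cases e with
      | nil =>
        exact hw p (by simp [hp]) (by rw [hp1]; simp)
      | cons f fs =>
        have hey : (f :: fs) <+: w :=
          pvPref P hT hmem w (f :: fs) p.1 (List.mem_map_of_mem (hQ p (by simp [hp])))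
            (by rw [hp1]; exact List.suffix_cons _ _) (by simp) he
        refine hw p (by simp [hp]) ?_
        rw [hp1]
        exact List.isPrefixOf_iff_prefix.mpr ((List.prefix_cons_inj _).mpr hey)

-- MAIN LEMMA: under the conditions, the ordered sequence of replace passes equals one scan
theorem pvScan_eq_passes (P : List (List Char × List Char))
    (hN : pvNECond P) (hT : pvTailCond P) (hO : pvOrdCond P) :
    ∀ (s : List Char), P.foldl pvStep s = pvScan P s := by
  suffices h : ∀ (n : Nat) (s : List Char), s.length ≤ n → P.foldl pvStep s = pvScan P s by
    intro s; exact h s.length s le_rfl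
  intro n
  induction n with
  | zero =>
    intro s hs
    have : s = [] := by cases s <;> simp_all
    subst this
    rw [pvFold_nil]; simp [pvScan]
  | succ n ih =>
    intro s hs
    cases s with
    | nil => rw [pvFold_nil]; simp [pvScan]
    | cons c w =>
      cases hfind : P.find? (fun p => p.1.isPrefixOf (c :: w)) with
      | none =>
        have hnone := List.find?_eq_none.mp hfind
        rw [pvScan, hfind]
        rw [pvPasses_cons P hT hN P (fun p hp => hp) c w (fun p hp => by simpa using hnone p hp)]
        rw [ih w (by simpa using Nat.le_of_succ_le_succ (by simpa using hs))]
      | some p =>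
        obtain ⟨t, u⟩ := p
        obtain ⟨hpt, P₁, P₂, hPsplit, hP₁⟩ := List.find?_eq_some_iff_append.mp hfind
        have hmem : (t, u) ∈ P := by rw [hPsplit]; simp
        have htne : t ≠ [] := hN _ hmem
        obtain ⟨y, hy⟩ : ∃ y, t ++ y = c :: w := List.isPrefixOf_iff_prefix.mp hpt
        have hmax : max 1 t.length = t.length := by
          have : 1 ≤ t.length := by cases t <;> simp_all
          omega
        have hylen : y.length ≤ n := by
          have hl1 := congrArg List.length hy
          simp at hl1
          have hl2 : 1 ≤ t.length := by cases t <;> simp_all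
          simp at hs
          omega
        -- conditions from Pairwise for the two segments
        have hOsplit := hO
        rw [hPsplit] at hOsplit
        have hpair := List.pairwise_append.mp hOsplit
        have hC3 : ∀ p ∈ P₁, ∀ q, 0 < q → q < t.length →
            ¬ p.1.isPrefixOf (t.drop q) = true ∧ ¬ (t.drop q).isPrefixOf p.1 = true := by
          intro p hp q hq1 hq2
          exact (hpair.2.2 p hp (t, u) (by simp)).1 q hq2 hq1
        have hC4 : ∀ p ∈ P₂, ∀ q, q < u.length →
            ¬ p.1.isPrefixOf (u.drop q) = true ∧ ¬ (u.drop q).isPrefixOf p.1 = true := by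
          intro p hp q hq
          exact ((List.pairwise_cons.mp hpair.2.1).1 p hp).2 q hq
        have hQ₁ : ∀ p ∈ P₁, p ∈ P := by intro p hp; rw [hPsplit]; simp [hp]
        have hQ₂ : ∀ p ∈ P₂, p ∈ P := by intro p hp; rw [hPsplit]; simp [hp]
        -- segment 1: passes before the matching one walk over t
        have hseg1 : P₁.foldl pvStep (t ++ y) = t ++ P₁.foldl pvStep y := by
          apply pvFoldSkip P hT P₁ hQ₁ t y y (fun e tok _ _ _ h => h)
          intro p hp q hq habs
          rcases Nat.eq_zero_or_pos q with rfl | hq0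
          · have := hP₁ p hp
            simp only [List.drop_zero, hy] at habs
            simp_all
          · have habs' := List.isPrefixOf_iff_prefix.mp habs
            rcases List.prefix_or_prefix_of_prefix habs' (List.prefix_append (t.drop q) y) with h1 | h1
            · exact (hC3 p hp q hq0 hq).1 (List.isPrefixOf_iff_prefix.mpr h1)
            · exact (hC3 p hp q hq0 hq).2 (List.isPrefixOf_iff_prefix.mpr h1)
        -- the matching pass fires
        have hfire : ∀ z, pvRep t u (t ++ z) = u ++ pvRep t u z := by
          intro z
          obtain ⟨tc, tt, ht⟩ : ∃ tc tt, t = tc :: tt := by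
            cases t with
            | nil => exact absurd rfl htne
            | cons a b => exact ⟨a, b, rfl⟩
          have h1 : t ++ z = tc :: (tt ++ z) := by rw [ht]; rfl
          have h2 : t.isPrefixOf (tc :: (tt ++ z)) = true := by
            rw [← h1]; exact List.isPrefixOf_iff_prefix.mpr (List.prefix_append t z)
          have h4 : List.drop (max 1 t.length) (tc :: (tt ++ z)) = z := by
            rw [hmax, ← h1]; exact List.drop_left
          rw [h1, pvRep, if_pos h2, h4]
        -- segment 2: passes after the matching one walk over u
        have hseg2 : ∀ Z zy, (∀ e tok, tok ∈ P.map Prod.fst → e <:+ tok → e ≠ [] → e <+: Z → e <+: zy) →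
            P₂.foldl pvStep (u ++ Z) = u ++ P₂.foldl pvStep Z := by
          intro Z zy hrefl
          apply pvFoldSkip P hT P₂ hQ₂ u zy Z hrefl
          intro p hp q hq habs
          have habs' := List.isPrefixOf_iff_prefix.mp habs
          rcases List.prefix_or_prefix_of_prefix habs' (List.prefix_append (u.drop q) zy) with h1 | h1
          · exact (hC4 p hp q hq).1 (List.isPrefixOf_iff_prefix.mpr h1)
          · exact (hC4 p hp q hq).2 (List.isPrefixOf_iff_prefix.mpr h1)
        -- assemble
        calc P.foldl pvStep (c :: w)
            = P₂.foldl pvStep (pvRep t u (P₁.foldl pvStep (t ++ y))) := by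
              rw [hPsplit, ← hy, List.foldl_append, List.foldl_cons]; rfl
          _ = P₂.foldl pvStep (u ++ pvRep t u (P₁.foldl pvStep y)) := by rw [hseg1, hfire]
          _ = u ++ P₂.foldl pvStep (pvRep t u (P₁.foldl pvStep y)) := by
              apply hseg2 _ y
              intro e tok htok hsuf hne hpre
              exact pvFoldRefl P hT P₁ hQ₁ y e tok htok hsuf hne
                (pvPref P hT hmem _ e tok htok hsuf hne hpre)
          _ = u ++ P.foldl pvStep y := by
              rw [hPsplit, List.foldl_append, List.foldl_cons]; rfl
          _ = u ++ pvScan P y := by rw [ih y hylen]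
          _ = pvScan P (c :: w) := by
              rw [pvScan, hfind]
              show u ++ pvScan P y = u ++ pvScan P (List.drop (max 1 t.length) (c :: w))
              rw [hmax, ← hy, List.drop_left]

theorem pvCond1 : pvNECond pvTable1 ∧ pvTailCond pvTable1 ∧ pvOrdCond pvTable1 :=
  ⟨by unfold pvNECond; decide, by unfold pvTailCond; decide, by
    simp only [pvOrdCond, pvTable1]
    repeat refine List.Pairwise.cons (by decide) ?_
    exact List.Pairwise.nil⟩

set_option maxHeartbeats 2000000 in
theorem pvCond2 : pvNECond pvTable2 ∧ pvTailCond pvTable2 ∧ pvOrdCond pvTable2 :=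
  ⟨by unfold pvNECond; decide, by unfold pvTailCond; decide, by
    simp only [pvOrdCond, pvTable2]
    repeat refine List.Pairwise.cons (by decide) ?_
    exact List.Pairwise.nil⟩

-- bridge: a fold of Python str.replace passes is the fold of pvRep passes on char lists
theorem pvFoldStr (L : List (String × String)) :
    ∀ (h : String), (∀ p ∈ L, p.1.toList ≠ []) →
      (L.foldl (fun a p => PySem.Str.replace a p.1 p.2) h).toList =
        (L.map (fun p => (p.1.toList, p.2.toList))).foldl pvStep h.toList := by
  induction L with
  | nil => intro h _; rfl
  | cons p L' ih =>
    intro h hne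
    rw [List.foldl_cons, List.map_cons, List.foldl_cons]
    rw [ih _ (fun p hp => hne p (by simp [hp]))]
    congr 1
    rw [PySem.Str.toList_replace]
    exact pvReplace_eq_pvRep _ _ _ (hne p (by simp))

theorem pvA_toList (message : String) :
    (warning_text_to_html_py message).toList =
      pvTable2.foldl pvStep (pvTable1.foldl pvStep message.toList) := by
  show ((
    [ ("A_s,total", "A<sub>s,total</sub>"), ("A_s,min", "A<sub>s,min</sub>"),
      ("A_s,max", "A<sub>s,max</sub>"), ("A_s", "A<sub>s</sub>"),
      ("A_v,min", "A<sub>v,min</sub>"), ("A_v", "A<sub>v</sub>"), ("A_l", "A<sub>l</sub>"),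
      ("A_t/s", "A<sub>t</sub>/s"), ("At/s", "A<sub>t</sub>/s"), ("V_u", "V<sub>u</sub>"),
      ("V_n", "V<sub>n</sub>"), ("V_c", "V<sub>c</sub>"), ("V_s", "V<sub>s</sub>"),
      ("M_u", "M<sub>u</sub>"), ("M_n", "M<sub>n</sub>"), ("phi", "&phi;"),
      ("lambda_s", "&lambda;<sub>s</sub>"), ("f'c", "f&#8242;<sub>c</sub>"),
      ("cm2", "cm<sup>2</sup>") ] : List (String × String)).foldl
        (fun h p => PySem.Str.replace h p.1 p.2)
        (PySem.Str.replace (PySem.Str.replace (PySem.Str.replace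
          (PySem.Str.replace message "<=" "&le;") ">=" "&ge;") " < " " &lt; ") " > " " &gt; ")).toList
      = pvTable2.foldl pvStep (pvTable1.foldl pvStep message.toList)
  rw [pvFoldStr _ _ (by decide)]
  have hrep : ∀ (s : String) (o n : String), o.toList ≠ [] →
      (PySem.Str.replace s o n).toList = pvRep o.toList n.toList s.toList := by
    intro s o n ho
    rw [PySem.Str.toList_replace]
    exact pvReplace_eq_pvRep _ _ _ ho
  rw [hrep _ " > " " &gt; " (by decide), hrep _ " < " " &lt; " (by decide),
      hrep _ ">=" "&ge;" (by decide), hrep _ "<=" "&le;" (by decide)]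
  rfl

-- ===== VERDICT (by name: the statement is the Claim_ definition above) =====
theorem warning_text_to_html_py_spec : Claim_equal_warning_text_to_html_py := by
  intro message _
  unfold Spec_warning_text_to_html_py warning_text_to_html_py_alt
  apply String.toList_inj.mp
  rw [pvA_toList]
  rw [pvScan_eq_passes pvTable1 pvCond1.1 pvCond1.2.1 pvCond1.2.2]
  rw [pvScan_eq_passes pvTable2 pvCond2.1 pvCond2.2.1 pvCond2.2.2]
  simp
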